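-- pv_equiv track=rewrite | github.com/gming92/winterlightlabs | scoreSyntax.py | constitList
-- ===== SOURCE A (Python) =====
-- from collections import deque
--
-- syntax_labels= ['S','VP','NP','N','V','DET','ROOT', 'PRON', 'ADV', 'ADVP','VERB','NOUN','INTJ','CCONJ','AUX']
--
-- def getIndex(s, i):
--
--     # If input is invalid.
--     if s[i] != '[':
--         return 0
--
--     # Create a deque to use it as a stack.
--     d = deque()
--
--     # Traverse through all elements
--     # starting from i.
--     for k in range(i, len(s)):
--
--         # Pop a starting bracket
--         # for every closing bracket
--         if s[k] == ']':
--             d.popleft()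
--
--         # Push all starting brackets
--         elif s[k] == '[':
--             d.append(s[i])
--
--         # If deque becomes empty
--         if not d:
--             return k
--     return 0
--
-- def trimStr(string,lab):
--
--     for i in range(len(lab)):
--
--         # Retrieve labels from syntax_labels list
--         label = str('['+lab[i]+' ')
--
--         # Remove all node labels and opening brackets
--         short = string.replace(label, '')
--         string = short
--
--     # Remove all closing brackets and replace double spaces with single spaces
--     short = short.replace('] ]',']]').replace(']','').replace('  ',' ')
--
--     # Return a string without brackets and node labels
--     # and remove space after each constituent
--     return short[:-1]
--
-- def constitList(s):
--     # Create empty list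
--     c = []
--
--     # Go over string
--     for i in range(len(s)):
--
--         # Look for opening brackets
--         if s[i] == '[':
--
--             # Get the index of closing bracket
--             end = getIndex(s,i)
--
--             # Extract the constituent for that specific bracketing
--             constituent = trimStr(s[i:end],syntax_labels)
--
--             # Add constituent to empty list
--             c += [constituent]
--
--     # Return list of constituents
--     return c
-- ===== SOURCE B (Python) =====
-- syntax_labels = ['S','VP','NP','N','V','DET','ROOT','PRON','ADV','ADVP','VERB','NOUN','INTJ','CCONJ','AUX']
--
-- def trimStr(string, lab):
--     for label in lab:
--         string = string.replace('[' + label + ' ', '')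
--     return string.replace('] ]', ']]').replace(']', '').replace('  ', ' ')[:-1]
--
-- def constitList(s):
--     # One left-to-right pass: match every '[' with its closing ']' via a stack
--     # of open-bracket indices; unmatched brackets get end 0 (empty slice).
--     match = {}
--     stack = []
--     for k in range(len(s)):
--         if s[k] == '[':
--             stack.append(k)
--         elif s[k] == ']' and stack:
--             match[stack.pop()] = k
--     return [trimStr(s[i:match.get(i, 0)], syntax_labels)
--             for i in range(len(s)) if s[i] == '[']
-- ===== Notes on version B (the rewrite author's own statement) =====
-- stated objective: alternative
-- what changed: A rescans the string forward from every '[' with a deque counter (getIndex) to find its closing bracket; B makes a single left-to-right pass with a stack of open-bracket indices that records every bracket match in a dict once, then builds the constituents with flat dict lookups instead of per-bracket rescans.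
import Mathlib
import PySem

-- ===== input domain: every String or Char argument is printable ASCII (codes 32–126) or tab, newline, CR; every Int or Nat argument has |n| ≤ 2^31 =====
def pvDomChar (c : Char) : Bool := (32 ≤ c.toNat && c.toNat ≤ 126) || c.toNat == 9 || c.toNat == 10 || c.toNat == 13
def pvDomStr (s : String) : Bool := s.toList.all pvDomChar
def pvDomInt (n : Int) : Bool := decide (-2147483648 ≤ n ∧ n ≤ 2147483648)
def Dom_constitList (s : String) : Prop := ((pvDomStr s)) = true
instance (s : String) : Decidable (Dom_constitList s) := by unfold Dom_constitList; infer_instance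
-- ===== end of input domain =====

-- B replaces A's per-bracket forward rescan (getIndex) by ONE left-to-right stack pass that
-- records every bracket match in a dict, then a flat lookup loop; objective: alternative.

def syntaxLabels : List String :=
  ["S","VP","NP","N","V","DET","ROOT","PRON","ADV","ADVP","VERB","NOUN","INTJ","CCONJ","AUX"]

-- '[' + label + ' '  (built by both Pythons' trimStr)
def labelChars (l : String) : List Char := '[' :: l.toList ++ [' ']

-- the closing replace chain and [:-1], verbatim the same in A's and B's trimStr
def trimTail (short : List Char) : List Char :=
  PySem.List.slice (PySem.Chars.replace (PySem.Chars.replace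
      (PySem.Chars.replace short "] ]".toList "]]".toList) "]".toList []) "  ".toList " ".toList)
    none (some (-1))

-- ===== PORT A =====
-- A's trimStr: for i in range(len(lab)): strip '['+lab[i]+' '
def trimLoopA (lab : List String) (string : List Char) : List Char :=
  (List.range lab.length).foldl
    (fun str i => PySem.Chars.replace str (labelChars (lab.getD i "")) []) string

def trimStrA (string : List Char) (lab : List String) : List Char :=
  trimTail (trimLoopA lab string)

-- the deque d of getIndex, kept as a list: popleft = tail, append = ++ [si]
def getIndexLoop (cs : List Char) (si : Char) (k : Nat) (d : List Char) : Nat :=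
  if h : k < cs.length then
    let d' := if cs.getD k ' ' = ']' then d.tail
              else if cs.getD k ' ' = '[' then d ++ [si] else d
    if d'.isEmpty then k else getIndexLoop cs si (k+1) d'
  else 0
termination_by cs.length - k

def getIndex (cs : List Char) (i : Nat) : Nat :=
  if cs.getD i ' ' ≠ '[' then 0
  else getIndexLoop cs (cs.getD i ' ') i []

def constitList (s : String) : List String :=
  let cs := s.toList
  (List.range cs.length).foldl
    (fun c i =>
      if cs.getD i ' ' == '[' then
        c ++ [String.ofList (trimStrA
          (PySem.List.slice cs (some (i : Int)) (some ((getIndex cs i : Nat) : Int))) syntaxLabels)]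
      else c) []

-- ===== PORT B =====
-- B's trimStr: for label in lab: strip '['+label+' '
def trimLoopB (lab : List String) (string : List Char) : List Char :=
  lab.foldl (fun str l => PySem.Chars.replace str (labelChars l) []) string

def trimStrB (string : List Char) (lab : List String) : List Char :=
  trimTail (trimLoopB lab string)

-- the one-pass matcher: stack of open-bracket indices (Python list: append/pop at the end)
def buildLoop (cs : List Char) (k : Nat) (stack : List Nat) (m : PySem.Dict Nat Nat) :
    PySem.Dict Nat Nat :=
  if h : k < cs.length then
    if cs.getD k ' ' = '[' then buildLoop cs (k+1) (stack ++ [k]) m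
    else if cs.getD k ' ' = ']' ∧ stack ≠ [] then
      buildLoop cs (k+1) stack.dropLast (m.insert (stack.getLastD 0) k)
    else buildLoop cs (k+1) stack m
  else m
termination_by cs.length - k

def constitList_alt (s : String) : List String :=
  let cs := s.toList
  let m := buildLoop cs 0 [] PySem.Dict.empty
  ((List.range cs.length).filter (fun i => cs.getD i ' ' == '[')).map
    (fun (i : Nat) => String.ofList (trimStrB
      (PySem.List.slice cs (some (i : Int)) (some ((m.getD i 0 : Nat) : Int))) syntaxLabels))

-- ===== PRECONDITION & SPEC =====
def Spec_constitList (s : String) (out : List String) : Prop := out = constitList_alt s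
instance (s : String) (out : List String) : Decidable (Spec_constitList s out) := by
  unfold Spec_constitList; infer_instance

-- ===== CLAIM (what is proved, stated in full; the proofs are below) =====
def Claim_equal_constitList : Prop := ∀ (s : String), Dom_constitList s → Spec_constitList s (constitList s)

-- ===== LEMMAS AND PROOFS =====

-- balance prefix sum: pvP cs k = #'[' − #']' among the first k characters
def pvDelta (c : Char) : Int := if c = '[' then 1 else if c = ']' then -1 else 0

def pvP (cs : List Char) (k : Nat) : Int := ((cs.take k).map pvDelta).sum

lemma pvP_succ (cs : List Char) (k : Nat) (h : k < cs.length) :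
    pvP cs (k+1) = pvP cs k + pvDelta (cs.getD k ' ') := by
  unfold pvP
  rw [List.take_add_one, List.getElem?_eq_getElem h, List.getD_eq_getElem (l := cs) (d := ' ') h]
  simp only [Option.toList_some, List.map_append, List.sum_append, List.map_cons, List.map_nil,
    List.sum_cons, List.sum_nil]
  omega

lemma foldl_range_getD {α β : Type} (g : β → α → β) (d : α) :
    ∀ (l : List α) (x : β),
      (List.range l.length).foldl (fun a i => g a (l.getD i d)) x = l.foldl g x := by
  intro l
  induction l using List.reverseRecOn with
  | nil => intro x; simp
  | append_singleton l y ih =>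
    intro x
    rw [List.length_append, List.length_singleton, List.range_succ, List.foldl_append,
        List.foldl_append]
    have h1 : (List.range l.length).foldl (fun a i => g a ((l ++ [y]).getD i d)) x
        = (List.range l.length).foldl (fun a i => g a (l.getD i d)) x := by
      apply List.foldl_ext
      intro a i hi
      have hlt : i < l.length := List.mem_range.mp hi
      rw [List.getD_append _ _ _ _ hlt]
    rw [h1, ih]
    simp

lemma trimStr_eq (x : List Char) : trimStrA x syntaxLabels = trimStrB x syntaxLabels :=
  congrArg trimTail
    (foldl_range_getD (fun str l => PySem.Chars.replace str (labelChars l) []) "" syntaxLabels x)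

-- A's scan from i, characterized: matched case
lemma getIndexLoop_matched (cs : List Char) (si : Char) (i p : Nat)
    (hpn : p < cs.length) (hz : pvP cs (p+1) = pvP cs i)
    (hpos : ∀ q, i < q → q ≤ p → 1 ≤ pvP cs q - pvP cs i) :
    ∀ n q d, p + 1 - q = n → i < q → q ≤ p → (d.length : Int) = pvP cs q - pvP cs i →
      getIndexLoop cs si q d = p := by
  intro n
  induction n with
  | zero => intro q d hn hiq hqp hd; omega
  | succ n ih =>
    intro q d hn hiq hqp hd
    have hqn : q < cs.length := lt_of_le_of_lt hqp hpn
    have hpq := pvP_succ cs q hqn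
    have hpos1 : 1 ≤ pvP cs q - pvP cs i := hpos q hiq hqp
    have hd1 : 1 ≤ d.length := by omega
    rw [getIndexLoop.eq_def, dif_pos hqn]
    dsimp only
    set D := (if cs.getD q ' ' = ']' then d.tail
              else if cs.getD q ' ' = '[' then d ++ [si] else d) with hDdef
    have hD : (D.length : Int) = pvP cs (q+1) - pvP cs i := by
      rw [hDdef]
      split_ifs with h1 h2
      · have hδ : pvDelta (cs.getD q ' ') = -1 := by rw [h1]; decide
        rw [hδ] at hpq
        rw [List.length_tail]
        omega
      · have hδ : pvDelta (cs.getD q ' ') = 1 := by rw [h2]; decide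
        rw [hδ] at hpq
        simp only [List.length_append, List.length_cons, List.length_nil]
        omega
      · have hδ : pvDelta (cs.getD q ' ') = 0 := by
          unfold pvDelta; rw [if_neg h2, if_neg h1]
        rw [hδ] at hpq
        omega
    by_cases hqp' : q = p
    · subst hqp'
      have hD0 : D.length = 0 := by omega
      rw [if_pos (by simpa [List.isEmpty_iff_length_eq_zero] using hD0)]
    · have h2' : 1 ≤ pvP cs (q+1) - pvP cs i := hpos (q+1) (by omega) (by omega)
      have hne : ¬ (D.isEmpty = true) := by
        simp only [List.isEmpty_iff_length_eq_zero]
        omega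
      rw [if_neg hne]
      exact ih (q+1) D (by omega) (by omega) (by omega) hD

lemma getIndexLoop_unmatched (cs : List Char) (si : Char) (i : Nat)
    (hpos : ∀ q, i < q → q ≤ cs.length → 1 ≤ pvP cs q - pvP cs i) :
    ∀ n q d, cs.length - q = n → i < q → q ≤ cs.length →
      (d.length : Int) = pvP cs q - pvP cs i → getIndexLoop cs si q d = 0 := by
  intro n
  induction n with
  | zero =>
    intro q d hn hiq hqn hd
    rw [getIndexLoop.eq_def, dif_neg (by omega)]
  | succ n ih =>
    intro q d hn hiq hqn hd
    have hqlt : q < cs.length := by omega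
    have hpq := pvP_succ cs q hqlt
    have hpos1 : 1 ≤ pvP cs q - pvP cs i := hpos q hiq hqn
    have hd1 : 1 ≤ d.length := by omega
    rw [getIndexLoop.eq_def, dif_pos hqlt]
    dsimp only
    set D := (if cs.getD q ' ' = ']' then d.tail
              else if cs.getD q ' ' = '[' then d ++ [si] else d) with hDdef
    have hD : (D.length : Int) = pvP cs (q+1) - pvP cs i := by
      rw [hDdef]
      split_ifs with h1 h2
      · have hδ : pvDelta (cs.getD q ' ') = -1 := by rw [h1]; decide
        rw [hδ] at hpq
        rw [List.length_tail]
        omega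
      · have hδ : pvDelta (cs.getD q ' ') = 1 := by rw [h2]; decide
        rw [hδ] at hpq
        simp only [List.length_append, List.length_cons, List.length_nil]
        omega
      · have hδ : pvDelta (cs.getD q ' ') = 0 := by
          unfold pvDelta; rw [if_neg h2, if_neg h1]
        rw [hδ] at hpq
        omega
    have h2' : 1 ≤ pvP cs (q+1) - pvP cs i := hpos (q+1) (by omega) (by omega)
    have hne : ¬ (D.isEmpty = true) := by
      simp only [List.isEmpty_iff_length_eq_zero]
      omega
    rw [if_neg hne]
    exact ih (q+1) D (by omega) (by omega) (by omega) hD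

lemma pvP_open_step (cs : List Char) (i : Nat) (hin : i < cs.length)
    (hi : cs.getD i ' ' = '[') : pvP cs (i+1) = pvP cs i + 1 := by
  have hpq := pvP_succ cs i hin
  have hδ : pvDelta (cs.getD i ' ') = 1 := by rw [hi]; decide
  rw [hδ] at hpq
  exact hpq

lemma getIndex_start (cs : List Char) (i : Nat) (hin : i < cs.length)
    (hi : cs.getD i ' ' = '[') :
    getIndex cs i = getIndexLoop cs '[' (i+1) ['['] := by
  rw [getIndex, hi]
  rw [if_neg (by decide : ¬(('[' : Char) ≠ '['))]
  rw [getIndexLoop.eq_def, dif_pos hin, hi]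
  dsimp only
  rw [if_neg (by decide : ¬ (('[' : Char) = ']')), if_pos (rfl : ('[' : Char) = '[')]
  simp

lemma getIndex_matched (cs : List Char) (i p : Nat)
    (hi : cs.getD i ' ' = '[') (hip : i < p) (hpn : p < cs.length)
    (hz : pvP cs (p+1) = pvP cs i)
    (hpos : ∀ q, i < q → q ≤ p → 1 ≤ pvP cs q - pvP cs i) :
    getIndex cs i = p := by
  rw [getIndex_start cs i (lt_trans hip hpn) hi]
  have h1 : ((1:Nat) : Int) = pvP cs (i+1) - pvP cs i := by
    rw [pvP_open_step cs i (lt_trans hip hpn) hi]; omega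
  exact getIndexLoop_matched cs '[' i p hpn hz hpos (p - i) (i+1) ['[']
    (by omega) (by omega) (by omega) (by simpa using h1)

lemma getIndex_unmatched (cs : List Char) (i : Nat)
    (hi : cs.getD i ' ' = '[') (hin : i < cs.length)
    (hpos : ∀ q, i < q → q ≤ cs.length → 1 ≤ pvP cs q - pvP cs i) :
    getIndex cs i = 0 := by
  rw [getIndex_start cs i hin hi]
  have h1 : ((1:Nat) : Int) = pvP cs (i+1) - pvP cs i := by
    rw [pvP_open_step cs i hin hi]; omega
  exact getIndexLoop_unmatched cs '[' i hpos (cs.length - (i+1)) (i+1) ['[']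
    (by omega) (by omega) (by omega) (by simpa using h1)

-- invariant of B's one-pass matcher
def pvInv (cs : List Char) (k : Nat) (stack : List Nat) (m : PySem.Dict Nat Nat) : Prop :=
  (∀ j ∈ stack, j < k ∧ cs.getD j ' ' = '[') ∧
  stack.Pairwise (· < ·) ∧
  (∀ j ∈ stack, pvP cs k - pvP cs j = (stack.countP (fun x => decide (j < x)) : Int) + 1) ∧
  (∀ j ∈ stack, ∀ q, j < q → q ≤ k → 1 ≤ pvP cs q - pvP cs j) ∧
  (∀ j ∈ stack, m.get? j = none) ∧
  (∀ j p, m.get? j = some p →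
      j < p ∧ p < k ∧ cs.getD j ' ' = '[' ∧ pvP cs (p+1) = pvP cs j ∧
      (∀ q, j < q → q ≤ p → 1 ≤ pvP cs q - pvP cs j)) ∧
  (∀ j, j < k → cs.getD j ' ' = '[' → j ∈ stack ∨ (m.get? j).isSome = true)

lemma pvInv_init (cs : List Char) : pvInv cs 0 [] PySem.Dict.empty := by
  refine ⟨?_, ?_, ?_, ?_, ?_, ?_, ?_⟩ <;> simp [PySem.Dict.get?_empty]

lemma pvInv_push (cs : List Char) (k : Nat) (stack : List Nat) (m : PySem.Dict Nat Nat)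
    (hI : pvInv cs k stack m) (hk : k < cs.length) (hc : cs.getD k ' ' = '[') :
    pvInv cs (k+1) (stack ++ [k]) m := by
  obtain ⟨h1, h2, h3, h4, h5, h6, h7⟩ := hI
  have hpq := pvP_open_step cs k hk hc
  have hmem : ∀ j, j ∈ stack ++ [k] ↔ j ∈ stack ∨ j = k := by
    intro j; simp [List.mem_append]
  refine ⟨?_, ?_, ?_, ?_, ?_, ?_, ?_⟩
  · intro j hj
    rcases (hmem j).mp hj with h | h
    · exact ⟨by have := (h1 j h).1; omega, (h1 j h).2⟩
    · exact ⟨by omega, by rw [h]; exact hc⟩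
  · rw [List.pairwise_append]
    refine ⟨h2, List.pairwise_singleton _ _, ?_⟩
    intro a ha b hb
    rw [List.mem_singleton] at hb; subst hb
    exact (h1 a ha).1
  · intro j hj
    rcases (hmem j).mp hj with h | h
    · have hjk : j < k := (h1 j h).1
      have hcount : (stack ++ [k]).countP (fun x => decide (j < x))
          = stack.countP (fun x => decide (j < x)) + 1 := by
        rw [List.countP_append]
        simp [hjk]
      have h3' := h3 j h
      rw [hcount]
      push_cast
      omega
    · rw [h]
      have hcount : (stack ++ [k]).countP (fun x => decide (k < x)) = 0 := by
        rw [List.countP_eq_zero]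
        intro a ha
        rcases (hmem a).mp ha with h' | h'
        · have := (h1 a h').1
          simp only [decide_eq_true_eq]
          omega
        · rw [h']; simp
      rw [hcount]
      push_cast
      omega
  · intro j hj q hjq hqk
    rcases (hmem j).mp hj with h | h
    · by_cases hq : q ≤ k
      · exact h4 j h q hjq hq
      · have hq1 : q = k + 1 := by omega
        subst hq1
        have h3' := h3 j h
        omega
    · have hq1 : q = k + 1 := by omega
      rw [hq1, h]
      omega
  · intro j hj
    rcases (hmem j).mp hj with h | h
    · exact h5 j h
    · cases hmk : m.get? j with
      | none => rfl
      | some p =>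
        have h61 := (h6 j p hmk).1
        have h62 := (h6 j p hmk).2.1
        exact absurd h61 (by omega)
  · intro j p hjp
    obtain ⟨ha, hb, hcc, hd, he⟩ := h6 j p hjp
    exact ⟨ha, by omega, hcc, hd, he⟩
  · intro j hjk hbr
    by_cases h : j = k
    · exact Or.inl ((hmem j).mpr (Or.inr h))
    · rcases h7 j (by omega) hbr with h' | h'
      · exact Or.inl ((hmem j).mpr (Or.inl h'))
      · exact Or.inr h'

lemma pvInv_pop (cs : List Char) (k : Nat) (stack : List Nat) (m : PySem.Dict Nat Nat)
    (hI : pvInv cs k stack m) (hk : k < cs.length)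
    (hc : cs.getD k ' ' = ']') (hne : stack ≠ []) :
    pvInv cs (k+1) stack.dropLast (m.insert (stack.getLastD 0) k) := by
  obtain ⟨h1, h2, h3, h4, h5, h6, h7⟩ := hI
  have hδ : pvDelta (cs.getD k ' ') = -1 := by rw [hc]; decide
  have hpq := pvP_succ cs k hk
  rw [hδ] at hpq
  set j0 := stack.getLast hne with hj0def
  have hgD : stack.getLastD 0 = j0 := by
    rw [List.getLastD_eq_getLast?, List.getLast?_eq_getLast_of_ne_nil hne]
    rfl
  have hdecomp : stack.dropLast ++ [j0] = stack := List.dropLast_append_getLast hne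
  have hmem : ∀ j, j ∈ stack ↔ j ∈ stack.dropLast ∨ j = j0 := by
    intro j
    conv_lhs => rw [← hdecomp]
    simp [List.mem_append]
  have hj0mem : j0 ∈ stack := List.getLast_mem hne
  have hlt : ∀ a ∈ stack.dropLast, a < j0 := by
    have h2' := h2
    rw [← hdecomp] at h2'
    have hpa := (List.pairwise_append.mp h2').2.2
    intro a ha
    exact hpa a ha j0 (List.mem_singleton_self j0)
  have hcount0 : stack.countP (fun x => decide (j0 < x)) = 0 := by
    rw [List.countP_eq_zero]
    intro a ha
    rcases (hmem a).mp ha with h | h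
    · have := hlt a h
      simp only [decide_eq_true_eq]
      omega
    · rw [h]; simp
  have hbal0 : pvP cs k - pvP cs j0 = 1 := by
    have h3' := h3 j0 hj0mem
    rw [hcount0] at h3'
    push_cast at h3'
    omega
  have hcountS : ∀ j ∈ stack.dropLast,
      stack.countP (fun x => decide (j < x))
        = stack.dropLast.countP (fun x => decide (j < x)) + 1 := by
    intro j hj
    conv_lhs => rw [← hdecomp]
    rw [List.countP_append]
    simp [hlt j hj]
  rw [hgD]
  refine ⟨?_, ?_, ?_, ?_, ?_, ?_, ?_⟩
  · intro j hj
    have hjs := (hmem j).mpr (Or.inl hj)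
    exact ⟨by have := (h1 j hjs).1; omega, (h1 j hjs).2⟩
  · exact h2.sublist (List.dropLast_sublist stack)
  · intro j hj
    have hjs := (hmem j).mpr (Or.inl hj)
    have h3' := h3 j hjs
    rw [hcountS j hj] at h3'
    push_cast at h3' ⊢
    omega
  · intro j hj q hjq hqk
    have hjs := (hmem j).mpr (Or.inl hj)
    by_cases hq : q ≤ k
    · exact h4 j hjs q hjq hq
    · have : q = k + 1 := by omega
      subst this
      have h3' := h3 j hjs
      rw [hcountS j hj] at h3'
      push_cast at h3'
      omega
  · intro j hj
    have hjne : j ≠ j0 := by have := hlt j hj; omega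
    rw [PySem.Dict.get?_insert, if_neg hjne]
    exact h5 j ((hmem j).mpr (Or.inl hj))
  · intro j p hjp
    rw [PySem.Dict.get?_insert] at hjp
    by_cases hjj : j = j0
    · rw [if_pos hjj] at hjp
      have hp : k = p := by injection hjp
      rw [hjj, ← hp]
      refine ⟨(h1 _ hj0mem).1, by omega, (h1 _ hj0mem).2, by omega, ?_⟩
      intro q hq1 hq2
      exact h4 _ hj0mem q hq1 hq2
    · rw [if_neg hjj] at hjp
      obtain ⟨ha, hb, hcc, hd, he⟩ := h6 j p hjp
      exact ⟨ha, by omega, hcc, hd, he⟩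
  · intro j hjk hbr
    by_cases h : j = k
    · rw [h, hc] at hbr
      exact absurd hbr (by decide)
    · rcases h7 j (by omega) hbr with h' | h'
      · rcases (hmem j).mp h' with h'' | h''
        · exact Or.inl h''
        · right
          rw [PySem.Dict.get?_insert, if_pos h'']
          rfl
      · right
        have hjne : j ≠ j0 := by
          intro hEq
          rw [hEq, h5 j0 hj0mem] at h'
          simp at h'
        rw [PySem.Dict.get?_insert, if_neg hjne]
        exact h'

lemma pvInv_skip (cs : List Char) (k : Nat) (stack : List Nat) (m : PySem.Dict Nat Nat)
    (hI : pvInv cs k stack m) (hk : k < cs.length)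
    (hc1 : ¬ cs.getD k ' ' = '[') (hc2 : cs.getD k ' ' = ']' → stack = []) :
    pvInv cs (k+1) stack m := by
  obtain ⟨h1, h2, h3, h4, h5, h6, h7⟩ := hI
  by_cases hcc : cs.getD k ' ' = ']'
  · have hst : stack = [] := hc2 hcc
    subst hst
    refine ⟨by simp, by simp, by simp, by simp, by simp, ?_, ?_⟩
    · intro j p hjp
      obtain ⟨ha, hb, hcb, hd, he⟩ := h6 j p hjp
      exact ⟨ha, by omega, hcb, hd, he⟩
    · intro j hjk hbr
      by_cases h : j = k
      · exact absurd (h ▸ hbr) hc1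
      · exact h7 j (by omega) hbr
  · have hδ : pvDelta (cs.getD k ' ') = 0 := by
      unfold pvDelta; rw [if_neg hc1, if_neg hcc]
    have hpq := pvP_succ cs k hk
    rw [hδ] at hpq
    refine ⟨?_, h2, ?_, ?_, h5, ?_, ?_⟩
    · intro j hj; exact ⟨by have := (h1 j hj).1; omega, (h1 j hj).2⟩
    · intro j hj
      have := h3 j hj
      omega
    · intro j hj q hjq hqk
      by_cases hq : q ≤ k
      · exact h4 j hj q hjq hq
      · have : q = k+1 := by omega
        subst this
        have := h3 j hj
        omega
    · intro j p hjp
      obtain ⟨ha, hb, hcb, hd, he⟩ := h6 j p hjp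
      exact ⟨ha, by omega, hcb, hd, he⟩
    · intro j hjk hbr
      by_cases h : j = k
      · exact absurd (h ▸ hbr) hc1
      · exact h7 j (by omega) hbr

lemma pvInv_final (cs : List Char) :
    ∀ n k stack m, cs.length - k = n → k ≤ cs.length → pvInv cs k stack m →
      ∃ stack', pvInv cs cs.length stack' (buildLoop cs k stack m) := by
  intro n
  induction n with
  | zero =>
    intro k stack m hn hk hI
    have hkl : ¬ k < cs.length := by omega
    have hke : k = cs.length := by omega
    subst hke
    rw [buildLoop.eq_def, dif_neg hkl]
    exact ⟨stack, hI⟩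
  | succ n ih =>
    intro k stack m hn hk hI
    have hklt : k < cs.length := by omega
    rw [buildLoop.eq_def, dif_pos hklt]
    by_cases hc1 : cs.getD k ' ' = '['
    · rw [if_pos hc1]
      exact ih (k+1) _ _ (by omega) (by omega) (pvInv_push cs k stack m hI hklt hc1)
    · rw [if_neg hc1]
      by_cases hc2 : cs.getD k ' ' = ']' ∧ stack ≠ []
      · rw [if_pos hc2]
        exact ih (k+1) _ _ (by omega) (by omega) (pvInv_pop cs k stack m hI hklt hc2.1 hc2.2)
      · rw [if_neg hc2]
        exact ih (k+1) _ _ (by omega) (by omega)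
          (pvInv_skip cs k stack m hI hklt hc1 (fun hcc => by tauto))

lemma main_match (cs : List Char) (i : Nat) (hin : i < cs.length)
    (hi : cs.getD i ' ' = '[') :
    getIndex cs i = (buildLoop cs 0 [] PySem.Dict.empty).getD i 0 := by
  obtain ⟨st', hInv⟩ :=
    pvInv_final cs cs.length 0 [] PySem.Dict.empty (by omega) (by omega) (pvInv_init cs)
  obtain ⟨h1, h2, h3, h4, h5, h6, h7⟩ := hInv
  rcases h7 i hin hi with hmem | hsome
  · rw [getIndex_unmatched cs i hi hin (h4 i hmem),
       PySem.Dict.getD_eq_get?_getD, h5 i hmem]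
    rfl
  · obtain ⟨p, hp⟩ := Option.isSome_iff_exists.mp hsome
    obtain ⟨hjp, hpk, _, hz, hpos⟩ := h6 i p hp
    rw [getIndex_matched cs i p hi hjp hpk hz hpos,
        PySem.Dict.getD_eq_get?_getD, hp]
    rfl

-- ===== VERDICT (by name: the statement is the Claim_ definition above) =====
theorem constitList_spec : Claim_equal_constitList := by
  intro s _
  unfold Spec_constitList
  simp only [constitList, constitList_alt]
  rw [PySem.List.foldl_append_if, List.nil_append]
  apply List.map_congr_left
  intro i hi
  rw [List.mem_filter] at hi
  have hlt : i < s.toList.length := List.mem_range.mp hi.1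
  have hbr : s.toList.getD i ' ' = '[' := by simpa using hi.2
  rw [main_match s.toList i hlt hbr, trimStr_eq]
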